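-- pv_equiv track=rewrite | github.com/BAMDH/Cosas_Uni | Intro programación/Prácticas/Notebooks_jupyter/Recursividad_cola_2/estimarPoblacionConejos.py | estimarPoblacionConejosAux
-- ===== SOURCE A (Python) =====
-- def estimarPoblacionConejosAux(n, numMesFinal, numHijosPorConejo, mesesVidaConejo, colaConejosAMorir, totalConejos):
--     if(n == numMesFinal):
--         return totalConejos;
--     else:
--         conejosNacidos = (totalConejos // 2 ) * numHijosPorConejo;
--
--         numConejosAMorir = 0;
--         if(len(colaConejosAMorir) == mesesVidaConejo):
--             numConejosAMorir = colaConejosAMorir[0];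
--             #colaConejosAMorir = colaConejosAMorir[1 : ];
--             del(colaConejosAMorir[0]);
--
--         colaConejosAMorir += [conejosNacidos];
--         totalConejos += conejosNacidos - numConejosAMorir;
--         return estimarPoblacionConejosAux(n + 1, numMesFinal, numHijosPorConejo, mesesVidaConejo, colaConejosAMorir, totalConejos);
-- ===== SOURCE B (Python) =====
-- def estimarPoblacionConejosAux(n, numMesFinal, numHijosPorConejo, mesesVidaConejo, colaConejosAMorir, totalConejos):
--     # Append-only history with a moving head index instead of recursion with
--     # destructive del(queue[0]); does not mutate the caller's list (return value
--     # is what is claimed equal).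
--     historial = list(colaConejosAMorir)
--     head = 0
--     total = totalConejos
--     for _ in range(numMesFinal - n):
--         nacidos = (total // 2) * numHijosPorConejo
--         muertos = 0
--         if len(historial) - head == mesesVidaConejo:
--             muertos = historial[head]
--             head += 1
--         historial.append(nacidos)
--         total += nacidos - muertos
--     return total
-- ===== Notes on version B (the rewrite author's own statement) =====
-- stated objective: alternative
-- what changed: Replaced tail recursion with destructive del(queue[0]) by an iterative loop over an append-only history list with a moving head index (no deletion, no recursion, caller's list not mutated).
import Mathlib
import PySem

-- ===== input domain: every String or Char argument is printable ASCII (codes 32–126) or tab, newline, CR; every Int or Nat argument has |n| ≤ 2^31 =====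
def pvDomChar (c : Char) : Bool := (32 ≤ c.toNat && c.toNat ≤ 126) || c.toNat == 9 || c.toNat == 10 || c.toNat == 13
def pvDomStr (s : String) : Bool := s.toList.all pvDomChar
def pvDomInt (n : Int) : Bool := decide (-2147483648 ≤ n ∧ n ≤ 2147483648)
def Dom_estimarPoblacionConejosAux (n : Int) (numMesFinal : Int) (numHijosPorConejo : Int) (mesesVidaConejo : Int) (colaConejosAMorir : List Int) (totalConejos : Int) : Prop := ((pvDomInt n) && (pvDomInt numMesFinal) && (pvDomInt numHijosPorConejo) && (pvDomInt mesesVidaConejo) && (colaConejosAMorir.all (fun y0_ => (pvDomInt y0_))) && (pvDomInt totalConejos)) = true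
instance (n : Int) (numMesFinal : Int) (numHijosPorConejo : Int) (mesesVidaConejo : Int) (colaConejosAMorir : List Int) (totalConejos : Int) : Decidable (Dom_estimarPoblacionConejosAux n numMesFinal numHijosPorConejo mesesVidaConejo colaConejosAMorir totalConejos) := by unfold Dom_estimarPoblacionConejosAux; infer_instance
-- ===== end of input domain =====

-- B replaces A's recursion with destructive del(queue[0]) by an iterative loop over an
-- append-only history list with a moving head index; return values are equal (B does not
-- mutate the caller's colaConejosAMorir, unlike A).


-- ===== PORT A =====
-- Literal port of the recursion.  When n > numMesFinal Python never reaches the base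
-- case and raises RecursionError: the guard `numMesFinal < n` only makes the port total
-- (outside Pre_).  `colaConejosAMorir[0]` on an empty list raises IndexError in Python
-- (only reachable when mesesVidaConejo = 0 and the list is empty, outside Pre_);
-- headD/tail stand in for that unreachable branch.
def estimarPoblacionConejosAux (n : Int) (numMesFinal : Int) (numHijosPorConejo : Int) (mesesVidaConejo : Int) (colaConejosAMorir : List Int) (totalConejos : Int) : Int :=
  if n = numMesFinal then totalConejos
  else if numMesFinal < n then totalConejos  -- totality guard; Python raises RecursionError here
  else
    let conejosNacidos := (PySem.Int.floordiv totalConejos 2) * numHijosPorConejo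
    let p : Int × List Int :=
      if (colaConejosAMorir.length : Int) = mesesVidaConejo then
        (colaConejosAMorir.headD 0, colaConejosAMorir.tail)
      else (0, colaConejosAMorir)
    estimarPoblacionConejosAux (n + 1) numMesFinal numHijosPorConejo mesesVidaConejo
      (p.2 ++ [conejosNacidos]) (totalConejos + conejosNacidos - p.1)
termination_by (numMesFinal - n).toNat
decreasing_by omega

-- ===== PORT B =====
def estimarPoblacionConejosAux_alt (n : Int) (numMesFinal : Int) (numHijosPorConejo : Int) (mesesVidaConejo : Int) (colaConejosAMorir : List Int) (totalConejos : Int) : Int :=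
  let st := (List.range (numMesFinal - n).toNat).foldl
    (fun (st : List Int × Nat × Int) _ =>
      let (historial, head, total) := st
      let nacidos := (PySem.Int.floordiv total 2) * numHijosPorConejo
      let (muertos, head') :=
        if ((historial.length : Int) - (head : Int)) = mesesVidaConejo then
          (historial.getD head 0, head + 1)
        else (0, head)
      (historial ++ [nacidos], head', total + nacidos - muertos))
    (colaConejosAMorir, 0, totalConejos)
  st.2.2

-- ===== PRECONDITION & SPEC =====
-- Pre_ excludes exactly the inputs on which Python A raises: n > numMesFinal, where the
-- recursion never reaches its base case (RecursionError), and the call with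
-- mesesVidaConejo = 0 on an empty queue (IndexError on colaConejosAMorir[0]).
def Pre_estimarPoblacionConejosAux (n : Int) (numMesFinal : Int) (numHijosPorConejo : Int) (mesesVidaConejo : Int) (colaConejosAMorir : List Int) (totalConejos : Int) : Prop :=
  n ≤ numMesFinal ∧
    (n < numMesFinal → ¬(mesesVidaConejo = 0 ∧ colaConejosAMorir = []))
instance (n : Int) (numMesFinal : Int) (numHijosPorConejo : Int) (mesesVidaConejo : Int) (colaConejosAMorir : List Int) (totalConejos : Int) : Decidable (Pre_estimarPoblacionConejosAux n numMesFinal numHijosPorConejo mesesVidaConejo colaConejosAMorir totalConejos) := by unfold Pre_estimarPoblacionConejosAux; infer_instance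

def pvWitness_estimarPoblacionConejosAux : Int × Int × Int × Int × List Int × Int := (0, 5, 2, 3, [1, 2], 10)

def Spec_estimarPoblacionConejosAux (n : Int) (numMesFinal : Int) (numHijosPorConejo : Int) (mesesVidaConejo : Int) (colaConejosAMorir : List Int) (totalConejos : Int) (out : Int) : Prop := out = estimarPoblacionConejosAux_alt n numMesFinal numHijosPorConejo mesesVidaConejo colaConejosAMorir totalConejos
instance (n : Int) (numMesFinal : Int) (numHijosPorConejo : Int) (mesesVidaConejo : Int) (colaConejosAMorir : List Int) (totalConejos : Int) (out : Int) : Decidable (Spec_estimarPoblacionConejosAux n numMesFinal numHijosPorConejo mesesVidaConejo colaConejosAMorir totalConejos out) := by unfold Spec_estimarPoblacionConejosAux; infer_instance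

-- ===== CLAIM (what is proved, stated in full; the proofs are below) =====
def Claim_equal_estimarPoblacionConejosAux : Prop := ∀ (n : Int) (numMesFinal : Int) (numHijosPorConejo : Int) (mesesVidaConejo : Int) (colaConejosAMorir : List Int) (totalConejos : Int), Dom_estimarPoblacionConejosAux n numMesFinal numHijosPorConejo mesesVidaConejo colaConejosAMorir totalConejos → Pre_estimarPoblacionConejosAux n numMesFinal numHijosPorConejo mesesVidaConejo colaConejosAMorir totalConejos → Spec_estimarPoblacionConejosAux n numMesFinal numHijosPorConejo mesesVidaConejo colaConejosAMorir totalConejos (estimarPoblacionConejosAux n numMesFinal numHijosPorConejo mesesVidaConejo colaConejosAMorir totalConejos)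

-- ===== LEMMAS AND PROOFS =====

-- B's loop body as a named function (identical to the lambda in the port of B).
def pvStepB (numHijosPorConejo mesesVidaConejo : Int) (st : List Int × Nat × Int) : List Int × Nat × Int :=
  let (historial, head, total) := st
  let nacidos := (PySem.Int.floordiv total 2) * numHijosPorConejo
  let (muertos, head') :=
    if ((historial.length : Int) - (head : Int)) = mesesVidaConejo then
      (historial.getD head 0, head + 1)
    else (0, head)
  (historial ++ [nacidos], head', total + nacidos - muertos)

lemma foldl_const_iterate {α β : Type} (g : α → α) (l : List β) (st : α) :
    l.foldl (fun s _ => g s) st = g^[l.length] st := by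
  induction l generalizing st with
  | nil => rfl
  | cons x xs ih => simp [List.foldl_cons, ih, Function.iterate_succ_apply]

-- the key invariant-carrying induction: A started at n = numMesFinal - k on the queue
-- historial.drop head equals the third component of k iterations of B's step.
lemma pv_main (numMesFinal numHijosPorConejo mesesVidaConejo : Int) :
    ∀ (k : Nat) (historial : List Int) (head : Nat) (total : Int),
      head ≤ historial.length →
      (mesesVidaConejo = 0 → head < historial.length ∨ k = 0) →
      estimarPoblacionConejosAux (numMesFinal - k) numMesFinal numHijosPorConejo
          mesesVidaConejo (historial.drop head) total
        = ((pvStepB numHijosPorConejo mesesVidaConejo)^[k] (historial, head, total)).2.2 := by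
  intro k
  induction k with
  | zero =>
    intro historial head total _ _
    simp [estimarPoblacionConejosAux]
  | succ k ih =>
    intro historial head total hle hm
    have hne : (numMesFinal - ((k : Int) + 1)) ≠ numMesFinal := by omega
    rw [Function.iterate_succ_apply]
    rw [estimarPoblacionConejosAux]
    have hcast : ((k + 1 : Nat) : Int) = (k : Int) + 1 := by push_cast; ring
    rw [hcast]
    simp only [hne, if_false, if_neg (by omega : ¬ numMesFinal < numMesFinal - ((k : Int) + 1))]
    have hlen : ((historial.drop head).length : Int) = (historial.length : Int) - (head : Int) := by
      simp [List.length_drop]; omega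
    by_cases hc : ((historial.length : Int) - (head : Int)) = mesesVidaConejo
    · -- a rabbit cohort dies
      have hhead : head < historial.length := by
        rcases eq_or_ne mesesVidaConejo 0 with h0 | h0
        · rcases hm h0 with h | h
          · exact h
          · exact absurd h (by omega)
        · omega
      have hstep : pvStepB numHijosPorConejo mesesVidaConejo (historial, head, total)
          = (historial ++ [(PySem.Int.floordiv total 2) * numHijosPorConejo], head + 1,
             total + (PySem.Int.floordiv total 2) * numHijosPorConejo - historial.getD head 0) := by
        simp [pvStepB, hc]
      rw [hstep]
      have hA : estimarPoblacionConejosAux (numMesFinal - (k : Int)) numMesFinal numHijosPorConejo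
            mesesVidaConejo
            ((historial ++ [(PySem.Int.floordiv total 2) * numHijosPorConejo]).drop (head + 1))
            (total + (PySem.Int.floordiv total 2) * numHijosPorConejo - historial.getD head 0)
          = ((pvStepB numHijosPorConejo mesesVidaConejo)^[k]
              (historial ++ [(PySem.Int.floordiv total 2) * numHijosPorConejo], head + 1,
               total + (PySem.Int.floordiv total 2) * numHijosPorConejo - historial.getD head 0)).2.2 := by
        apply ih
        · simp; omega
        · intro h0
          -- mesesVidaConejo = 0 contradicts hc together with head < length
          exfalso; rw [h0] at hc; omega
      rw [← hA]
      have hdropapp : (historial ++ [(PySem.Int.floordiv total 2) * numHijosPorConejo]).drop (head + 1)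
          = (historial.drop head).tail ++ [(PySem.Int.floordiv total 2) * numHijosPorConejo] := by
        rw [List.drop_append_of_le_length (by omega)]
        congr 1
        rw [List.tail_drop]
      have hheadD : (historial.drop head).headD 0 = historial.getD head 0 := by
        simp [List.head?_drop, List.getD_eq_getElem?_getD]
      have harith : numMesFinal - ((k : Int) + 1) + 1 = numMesFinal - (k : Int) := by ring
      simp only [hlen, hc, if_true, hheadD, hdropapp, harith]
    · -- nobody dies this month
      have hstep : pvStepB numHijosPorConejo mesesVidaConejo (historial, head, total)
          = (historial ++ [(PySem.Int.floordiv total 2) * numHijosPorConejo], head,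
             total + (PySem.Int.floordiv total 2) * numHijosPorConejo - 0) := by
        simp [pvStepB, hc]
      rw [hstep]
      have hA : estimarPoblacionConejosAux (numMesFinal - (k : Int)) numMesFinal numHijosPorConejo
            mesesVidaConejo
            ((historial ++ [(PySem.Int.floordiv total 2) * numHijosPorConejo]).drop head)
            (total + (PySem.Int.floordiv total 2) * numHijosPorConejo - 0)
          = ((pvStepB numHijosPorConejo mesesVidaConejo)^[k]
              (historial ++ [(PySem.Int.floordiv total 2) * numHijosPorConejo], head,
               total + (PySem.Int.floordiv total 2) * numHijosPorConejo - 0)).2.2 := by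
        apply ih
        · simp; omega
        · intro h0
          rcases hm h0 with h | h
          · left; simp; omega
          · exact absurd h (by omega)
      rw [← hA]
      have hdropapp : (historial ++ [(PySem.Int.floordiv total 2) * numHijosPorConejo]).drop head
          = historial.drop head ++ [(PySem.Int.floordiv total 2) * numHijosPorConejo] := by
        rw [List.drop_append_of_le_length (by omega)]
      have harith : numMesFinal - ((k : Int) + 1) + 1 = numMesFinal - (k : Int) := by ring
      simp only [hlen, hc, if_false, hdropapp, harith]

-- ===== VERDICT (by name: the statement is the Claim_ definition above) =====
theorem estimarPoblacionConejosAux_spec : Claim_equal_estimarPoblacionConejosAux := by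
  intro n numMesFinal numHijosPorConejo mesesVidaConejo colaConejosAMorir totalConejos _ hpre
  obtain ⟨hle, h0⟩ := hpre
  unfold Spec_estimarPoblacionConejosAux
  show _ = ((List.range (numMesFinal - n).toNat).foldl
      (fun (s : List Int × Nat × Int) (_ : Nat) => pvStepB numHijosPorConejo mesesVidaConejo s)
      (colaConejosAMorir, 0, totalConejos)).2.2
  rw [foldl_const_iterate (pvStepB numHijosPorConejo mesesVidaConejo)]
  have hk : n = numMesFinal - ((numMesFinal - n).toNat : Int) := by omega
  have := pv_main numMesFinal numHijosPorConejo mesesVidaConejo (numMesFinal - n).toNat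
    colaConejosAMorir 0 totalConejos (Nat.zero_le _)
    (by
      intro hm0
      rcases eq_or_lt_of_le hle with heq | hlt
      · right; omega
      · left
        have : colaConejosAMorir ≠ [] := fun hnil => (h0 hlt) ⟨hm0, hnil⟩
        cases colaConejosAMorir with
        | nil => exact absurd rfl this
        | cons a l => simp)
  simp only [List.drop_zero] at this
  rw [← hk] at this
  rw [List.length_range]
  exact this
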